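-- pv_equiv track=rewrite | github.com/Akali-yyds/GlobalReporter | crawler-service/news_crawler/utils/event_aggregator.py | get_country_from_tags
-- ===== SOURCE A (Python) =====
-- from typing import List, Dict, Optional, Tuple
--
-- def get_country_from_tags(country_tags: List[str]) -> str:
--     """Determine main country from tags."""
--     if not country_tags:
--         return "UNKNOWN"
--
--     # Prioritize certain countries
--     priority = ['CN', 'US', 'GB', 'RU', 'JP', 'KR', 'DE', 'FR', 'IN', 'AU']
--
--     for country in priority:
--         if country in country_tags:
--             return country
--
--     return country_tags[0] if country_tags else "UNKNOWN"
-- ===== SOURCE B (Python) =====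
-- def get_country_from_tags(country_tags):
--     """Determine main country from tags."""
--     if not country_tags:
--         return "UNKNOWN"
--
--     priority = ['CN', 'US', 'GB', 'RU', 'JP', 'KR', 'DE', 'FR', 'IN', 'AU']
--     rank = {c: i for i, c in enumerate(priority)}
--
--     best = None  # (rank, tag) with the smallest rank seen so far
--     for tag in country_tags:
--         r = rank.get(tag)
--         if r is not None and (best is None or r < best[0]):
--             best = (r, tag)
--
--     return best[1] if best is not None else country_tags[0]
-- ===== Notes on version B (the rewrite author's own statement) =====
-- stated objective: alternative
-- what changed: Replaces the scan of the priority list with repeated membership tests over the tags by a precomputed code->rank dict and a single pass over the tags tracking the minimum-rank tag.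
import Mathlib
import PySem

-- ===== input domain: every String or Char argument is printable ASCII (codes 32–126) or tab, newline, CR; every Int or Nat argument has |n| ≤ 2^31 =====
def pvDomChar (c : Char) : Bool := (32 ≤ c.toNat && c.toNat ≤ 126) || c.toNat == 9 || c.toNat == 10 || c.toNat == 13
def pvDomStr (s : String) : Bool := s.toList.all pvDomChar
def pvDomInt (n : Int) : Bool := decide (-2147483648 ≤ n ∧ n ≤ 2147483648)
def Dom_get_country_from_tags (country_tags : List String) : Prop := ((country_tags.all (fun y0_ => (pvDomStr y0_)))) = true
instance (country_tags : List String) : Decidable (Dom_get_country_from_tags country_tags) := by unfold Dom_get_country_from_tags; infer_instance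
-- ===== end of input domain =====

-- B replaces A's scan of the priority list (a membership test over the tags per priority code)
-- by a code→rank dict and one pass over the tags tracking the minimum-rank tag (alternative decomposition).

-- ===== PORT A =====
def pvPriority : List String := ["CN", "US", "GB", "RU", "JP", "KR", "DE", "FR", "IN", "AU"]

-- the `for country in priority` loop: first priority code contained in the tags
def pvFindPriority : List String → List String → Option String
  | [], _ => none
  | c :: rest, tags => if tags.contains c then some c else pvFindPriority rest tags

def get_country_from_tags (country_tags : List String) : String :=
  if country_tags = [] then "UNKNOWN"
  else
    match pvFindPriority pvPriority country_tags with
    | some c => c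
    | none =>
        if country_tags ≠ [] then PySem.List.pyGetD country_tags 0 "UNKNOWN" else "UNKNOWN"

-- ===== PORT B =====
-- rank = {c: i for i, c in enumerate(priority)}
def pvRankDict : PySem.Dict String Int :=
  (PySem.List.enumerate pvPriority 0).foldl (fun d p => d.insert p.2 p.1) PySem.Dict.empty

-- one iteration of B's `for tag in country_tags` loop
def pvBestStep (best : Option (Int × String)) (tag : String) : Option (Int × String) :=
  match pvRankDict.get? tag with
  | none => best
  | some r =>
      match best with
      | none => some (r, tag)
      | some b => if r < b.1 then some (r, tag) else best

def get_country_from_tags_alt (country_tags : List String) : String :=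
  if country_tags = [] then "UNKNOWN"
  else
    match country_tags.foldl pvBestStep none with
    | some b => b.2
    | none => PySem.List.pyGetD country_tags 0 "UNKNOWN"

-- ===== PRECONDITION & SPEC =====
def Spec_get_country_from_tags (country_tags : List String) (out : String) : Prop := out = get_country_from_tags_alt country_tags
instance (country_tags : List String) (out : String) : Decidable (Spec_get_country_from_tags country_tags out) := by unfold Spec_get_country_from_tags; infer_instance

-- ===== CLAIM (what is proved, stated in full; the proofs are below) =====
def Claim_equal_get_country_from_tags : Prop := ∀ (country_tags : List String), Dom_get_country_from_tags country_tags → Spec_get_country_from_tags country_tags (get_country_from_tags country_tags)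

-- ===== LEMMAS AND PROOFS =====

-- left-biased min (by rank) on optional (rank, tag) loop states
def pvCombine (a b : Option (Int × String)) : Option (Int × String) :=
  match a, b with
  | none, b => b
  | a, none => a
  | some x, some y => if y.1 < x.1 then some y else some x

def pvSingle (t : String) : Option (Int × String) :=
  (pvRankDict.get? t).map (fun r => (r, t))

-- the best state B reaches on a tag list, spelled out in priority order
def pvBspec (ts : List String) : Option (Int × String) :=
  if ts.contains "CN" then some (0, "CN")
  else if ts.contains "US" then some (1, "US")
  else if ts.contains "GB" then some (2, "GB")
  else if ts.contains "RU" then some (3, "RU")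
  else if ts.contains "JP" then some (4, "JP")
  else if ts.contains "KR" then some (5, "KR")
  else if ts.contains "DE" then some (6, "DE")
  else if ts.contains "FR" then some (7, "FR")
  else if ts.contains "IN" then some (8, "IN")
  else if ts.contains "AU" then some (9, "AU")
  else none

lemma pvRankDict_eq : pvRankDict = PySem.Dict.mk
    [("CN", 0), ("US", 1), ("GB", 2), ("RU", 3), ("JP", 4),
     ("KR", 5), ("DE", 6), ("FR", 7), ("IN", 8), ("AU", 9)] := by decide

lemma pvStep_eq_combine (s : Option (Int × String)) (t : String) :
    pvBestStep s t = pvCombine s (pvSingle t) := by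
  unfold pvBestStep pvSingle
  cases h : pvRankDict.get? t <;> cases s <;> simp [pvCombine]

lemma pvCombine_none_left (b : Option (Int × String)) : pvCombine none b = b := by
  cases b <;> rfl

lemma pvCombine_assoc (a b c : Option (Int × String)) :
    pvCombine (pvCombine a b) c = pvCombine a (pvCombine b c) := by
  rcases a with _ | ⟨ra, sa⟩ <;> rcases b with _ | ⟨rb, sb⟩ <;> rcases c with _ | ⟨rc, sc⟩ <;>
    (try simp only [pvCombine]) <;> (try split_ifs) <;>
    first
      | rfl
      | (exfalso; omega)
      | (simp only [pvCombine]; split_ifs <;> first | rfl | (exfalso; omega))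

lemma pvFold_shift (ts : List String) (s : Option (Int × String)) :
    ts.foldl pvBestStep s = pvCombine s (ts.foldl pvBestStep none) := by
  induction ts generalizing s with
  | nil => cases s <;> rfl
  | cons t ts ih =>
      simp only [List.foldl_cons]
      rw [ih (pvBestStep s t), ih (pvBestStep none t),
        pvStep_eq_combine s t, pvStep_eq_combine none t,
        pvCombine_none_left, pvCombine_assoc]

lemma pvBspec_cons_CN (ts : List String) :
    pvCombine (pvSingle "CN") (pvBspec ts) = pvBspec ("CN" :: ts) := by
  rw [show pvSingle "CN" = some (0, "CN") from by decide]
  simp only [pvBspec, List.contains_eq_mem, List.mem_cons, String.reduceEq,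
    false_or, true_or, if_true, decide_eq_true_eq]
  split_ifs <;> norm_num [pvCombine]

lemma pvBspec_cons_US (ts : List String) :
    pvCombine (pvSingle "US") (pvBspec ts) = pvBspec ("US" :: ts) := by
  rw [show pvSingle "US" = some (1, "US") from by decide]
  simp only [pvBspec, List.contains_eq_mem, List.mem_cons, String.reduceEq,
    false_or, true_or, if_true, decide_eq_true_eq]
  split_ifs <;> norm_num [pvCombine]

lemma pvBspec_cons_GB (ts : List String) :
    pvCombine (pvSingle "GB") (pvBspec ts) = pvBspec ("GB" :: ts) := by
  rw [show pvSingle "GB" = some (2, "GB") from by decide]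
  simp only [pvBspec, List.contains_eq_mem, List.mem_cons, String.reduceEq,
    false_or, true_or, if_true, decide_eq_true_eq]
  split_ifs <;> norm_num [pvCombine]

lemma pvBspec_cons_RU (ts : List String) :
    pvCombine (pvSingle "RU") (pvBspec ts) = pvBspec ("RU" :: ts) := by
  rw [show pvSingle "RU" = some (3, "RU") from by decide]
  simp only [pvBspec, List.contains_eq_mem, List.mem_cons, String.reduceEq,
    false_or, true_or, if_true, decide_eq_true_eq]
  split_ifs <;> norm_num [pvCombine]

lemma pvBspec_cons_JP (ts : List String) :
    pvCombine (pvSingle "JP") (pvBspec ts) = pvBspec ("JP" :: ts) := by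
  rw [show pvSingle "JP" = some (4, "JP") from by decide]
  simp only [pvBspec, List.contains_eq_mem, List.mem_cons, String.reduceEq,
    false_or, true_or, if_true, decide_eq_true_eq]
  split_ifs <;> norm_num [pvCombine]

lemma pvBspec_cons_KR (ts : List String) :
    pvCombine (pvSingle "KR") (pvBspec ts) = pvBspec ("KR" :: ts) := by
  rw [show pvSingle "KR" = some (5, "KR") from by decide]
  simp only [pvBspec, List.contains_eq_mem, List.mem_cons, String.reduceEq,
    false_or, true_or, if_true, decide_eq_true_eq]
  split_ifs <;> norm_num [pvCombine]

lemma pvBspec_cons_DE (ts : List String) :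
    pvCombine (pvSingle "DE") (pvBspec ts) = pvBspec ("DE" :: ts) := by
  rw [show pvSingle "DE" = some (6, "DE") from by decide]
  simp only [pvBspec, List.contains_eq_mem, List.mem_cons, String.reduceEq,
    false_or, true_or, if_true, decide_eq_true_eq]
  split_ifs <;> norm_num [pvCombine]

lemma pvBspec_cons_FR (ts : List String) :
    pvCombine (pvSingle "FR") (pvBspec ts) = pvBspec ("FR" :: ts) := by
  rw [show pvSingle "FR" = some (7, "FR") from by decide]
  simp only [pvBspec, List.contains_eq_mem, List.mem_cons, String.reduceEq,
    false_or, true_or, if_true, decide_eq_true_eq]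
  split_ifs <;> norm_num [pvCombine]

lemma pvBspec_cons_IN (ts : List String) :
    pvCombine (pvSingle "IN") (pvBspec ts) = pvBspec ("IN" :: ts) := by
  rw [show pvSingle "IN" = some (8, "IN") from by decide]
  simp only [pvBspec, List.contains_eq_mem, List.mem_cons, String.reduceEq,
    false_or, true_or, if_true, decide_eq_true_eq]
  split_ifs <;> norm_num [pvCombine]

lemma pvBspec_cons_AU (ts : List String) :
    pvCombine (pvSingle "AU") (pvBspec ts) = pvBspec ("AU" :: ts) := by
  rw [show pvSingle "AU" = some (9, "AU") from by decide]
  simp only [pvBspec, List.contains_eq_mem, List.mem_cons, String.reduceEq,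
    false_or, true_or, if_true, decide_eq_true_eq]
  split_ifs <;> norm_num [pvCombine]

lemma pvBspec_cons (t : String) (ts : List String) :
    pvCombine (pvSingle t) (pvBspec ts) = pvBspec (t :: ts) := by
  by_cases hCN : t = "CN"
  · subst hCN; exact pvBspec_cons_CN ts
  by_cases hUS : t = "US"
  · subst hUS; exact pvBspec_cons_US ts
  by_cases hGB : t = "GB"
  · subst hGB; exact pvBspec_cons_GB ts
  by_cases hRU : t = "RU"
  · subst hRU; exact pvBspec_cons_RU ts
  by_cases hJP : t = "JP"
  · subst hJP; exact pvBspec_cons_JP ts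
  by_cases hKR : t = "KR"
  · subst hKR; exact pvBspec_cons_KR ts
  by_cases hDE : t = "DE"
  · subst hDE; exact pvBspec_cons_DE ts
  by_cases hFR : t = "FR"
  · subst hFR; exact pvBspec_cons_FR ts
  by_cases hIN : t = "IN"
  · subst hIN; exact pvBspec_cons_IN ts
  by_cases hAU : t = "AU"
  · subst hAU; exact pvBspec_cons_AU ts
  have hs : pvSingle t = none := by
    simp only [pvSingle, pvRankDict_eq, PySem.Dict.get?_mk_cons, beq_iff_eq]
    rw [if_neg (Ne.symm hCN), if_neg (Ne.symm hUS), if_neg (Ne.symm hGB), if_neg (Ne.symm hRU),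
      if_neg (Ne.symm hJP), if_neg (Ne.symm hKR), if_neg (Ne.symm hDE), if_neg (Ne.symm hFR),
      if_neg (Ne.symm hIN), if_neg (Ne.symm hAU)]
    rfl
  rw [hs, pvCombine_none_left]
  simp [pvBspec, Ne.symm hCN, Ne.symm hUS, Ne.symm hGB, Ne.symm hRU, Ne.symm hJP, Ne.symm hKR, Ne.symm hDE, Ne.symm hFR, Ne.symm hIN, Ne.symm hAU]

lemma pvFold_eq_bspec (ts : List String) : ts.foldl pvBestStep none = pvBspec ts := by
  induction ts with
  | nil => rfl
  | cons t ts ih =>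
      simp only [List.foldl_cons]
      rw [pvFold_shift, pvStep_eq_combine none t, pvCombine_none_left, ih, pvBspec_cons]

lemma pvFind_eq_bspec_snd (ts : List String) :
    pvFindPriority pvPriority ts = (pvBspec ts).map Prod.snd := by
  have h : pvFindPriority pvPriority ts =
      (if ts.contains "CN" then some "CN"
      else if ts.contains "US" then some "US"
      else if ts.contains "GB" then some "GB"
      else if ts.contains "RU" then some "RU"
      else if ts.contains "JP" then some "JP"
      else if ts.contains "KR" then some "KR"
      else if ts.contains "DE" then some "DE"
      else if ts.contains "FR" then some "FR"
      else if ts.contains "IN" then some "IN"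
      else if ts.contains "AU" then some "AU"
      else none) := by simp only [pvPriority, pvFindPriority]
  rw [h]
  simp only [pvBspec, apply_ite (Option.map Prod.snd), Option.map_some, Option.map_none]

-- ===== VERDICT (by name: the statement is the Claim_ definition above) =====
theorem get_country_from_tags_spec : Claim_equal_get_country_from_tags := by
  intro ts _
  unfold Spec_get_country_from_tags get_country_from_tags get_country_from_tags_alt
  by_cases hnil : ts = []
  · simp [hnil]
  · simp only [hnil, if_false, ne_eq, not_false_iff, if_true]
    rw [pvFind_eq_bspec_snd, pvFold_eq_bspec]
    cases pvBspec ts <;> simp
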